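-- pv_equiv track=rewrite | github.com/qilei123/UDTweet | clean_the_text.py | remove_a
-- ===== SOURCE A (Python) =====
-- def remove_a(inputString):
--     elements = inputString.split(" ")
--     outputString = ""
--     for element in elements:
--         if not "&" in element:
--             outputString+=element
--         outputString+=" "
--     return outputString
-- ===== SOURCE B (Python) =====
-- def remove_a(inputString):
--     # One-pass character scan: no token list is built; a flag tracks whether
--     # the current space-delimited token contains '&'.
--     out = []
--     tok = []
--     bad = False
--     for ch in inputString + " ":
--         if ch == " ":
--             if not bad:
--                 out.extend(tok)
--             out.append(" ")
--             tok = []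
--             bad = False
--         else:
--             tok.append(ch)
--             if ch == "&":
--                 bad = True
--     return "".join(out)
-- ===== Notes on version B (the rewrite author's own statement) =====
-- stated objective: alternative
-- what changed: Replaced split-into-token-list + per-token membership test by a single character scan that keeps a current-token buffer and a contains-'&' flag, flushing at each space; no intermediate token list is built.
import Mathlib
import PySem

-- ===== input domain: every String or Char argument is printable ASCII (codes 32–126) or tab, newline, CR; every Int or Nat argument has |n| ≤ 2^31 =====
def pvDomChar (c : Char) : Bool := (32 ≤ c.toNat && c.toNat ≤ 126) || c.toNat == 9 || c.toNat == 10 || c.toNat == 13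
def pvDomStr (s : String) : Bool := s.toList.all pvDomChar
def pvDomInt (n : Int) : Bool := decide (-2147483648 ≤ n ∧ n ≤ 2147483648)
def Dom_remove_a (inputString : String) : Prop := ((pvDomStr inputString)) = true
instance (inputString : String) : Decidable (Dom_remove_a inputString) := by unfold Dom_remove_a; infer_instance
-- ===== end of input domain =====

-- B replaces A's split-then-filter token loop by a single character scan with a
-- current-token buffer and a contains-'&' flag (objective: alternative, same cost).

-- ===== PORT A =====
def remove_a (inputString : String) : String :=
  let elements := (PySem.Str.split? inputString " ").getD []
  elements.foldl (fun outputString element =>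
    (if PySem.Str.isIn "&" element then outputString else outputString ++ element) ++ " ") ""

-- ===== PORT B =====
-- the for-loop over the characters of (inputString + " "), with state (tok, bad)
def scanB : List Char → List Char → Bool → List Char
  | [], _, _ => []
  | c :: rest, tok, bad =>
    if c = ' ' then (if bad then [] else tok) ++ ' ' :: scanB rest [] false
    else scanB rest (tok ++ [c]) (bad || c = '&')

def remove_a_alt (inputString : String) : String :=
  String.ofList (scanB (inputString.toList ++ [' ']) [] false)

-- ===== PRECONDITION & SPEC =====
def Spec_remove_a (inputString : String) (out : String) : Prop := out = remove_a_alt inputString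
instance (inputString : String) (out : String) : Decidable (Spec_remove_a inputString out) := by unfold Spec_remove_a; infer_instance

-- ===== CLAIM (what is proved, stated in full; the proofs are below) =====
def Claim_equal_remove_a : Prop := ∀ (inputString : String), Dom_remove_a inputString → Spec_remove_a inputString (remove_a inputString)

-- ===== LEMMAS AND PROOFS =====

-- simple split-on-space used as the common description of both programs
def spTok : List Char → List (List Char)
  | [] => [[]]
  | c :: cs =>
    if c = ' ' then [] :: spTok cs
    else match spTok cs with
      | [] => [[c]]
      | t :: ts => (c :: t) :: ts

theorem spTok_ne_nil (cs : List Char) : spTok cs ≠ [] := by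
  cases cs with
  | nil => simp [spTok]
  | cons c cs =>
    simp only [spTok]
    split
    · simp
    · cases h : spTok cs <;> simp

theorem splitOn_go_space (fuel : Nat) (l cur : List Char) (acc : List (List Char))
    (h : l.length ≤ fuel) :
    PySem.Chars.splitOn.go [' '] fuel l cur acc =
      acc.reverse ++ (match spTok l with
        | [] => [cur.reverse]
        | t :: ts => (cur.reverse ++ t) :: ts) := by
  induction fuel generalizing l cur acc with
  | zero =>
    interval_cases hl : l.length
    cases l with
    | nil => simp [PySem.Chars.splitOn.go, spTok]
    | cons c cs => simp at hl
  | succ fuel ih =>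
    cases l with
    | nil => simp [PySem.Chars.splitOn.go, spTok]
    | cons c cs =>
      by_cases hc : c = ' '
      · subst hc
        rw [show PySem.Chars.splitOn.go [' '] (fuel+1) (' ' :: cs) cur acc
              = PySem.Chars.splitOn.go [' '] fuel cs [] (cur.reverse :: acc) by
            simp [PySem.Chars.splitOn.go, List.isPrefixOf]]
        rw [ih cs [] (cur.reverse :: acc) (by simpa using Nat.le_of_succ_le_succ h)]
        have hne := spTok_ne_nil cs
        cases hs : spTok cs with
        | nil => exact absurd hs hne
        | cons t ts => simp [spTok, hs]
      · rw [show PySem.Chars.splitOn.go [' '] (fuel+1) (c :: cs) cur acc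
              = PySem.Chars.splitOn.go [' '] fuel cs (c :: cur) acc by
            simp [PySem.Chars.splitOn.go, List.isPrefixOf, Ne.symm hc]]
        rw [ih cs (c :: cur) acc (by simpa using Nat.le_of_succ_le_succ h)]
        have hne := spTok_ne_nil cs
        cases hs : spTok cs with
        | nil => exact absurd hs hne
        | cons t ts => simp [spTok, hs, hc]

theorem splitOn_space (cs : List Char) : PySem.Chars.splitOn cs [' '] = spTok cs := by
  rw [PySem.Chars.splitOn, splitOn_go_space cs.length.succ cs [] [] (by omega)]
  have hne := spTok_ne_nil cs
  cases hs : spTok cs with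
  | nil => exact absurd hs hne
  | cons t ts => simp

-- common output description on char-list tokens
def outTok (ts : List (List Char)) : List Char :=
  (ts.map (fun t => (if '&' ∈ t then [] else t) ++ [' '])).flatten

theorem singleton_infix_iff_mem (a : Char) (l : List Char) : [a] <:+: l ↔ a ∈ l := by
  constructor
  · intro h; exact h.subset (by simp)
  · intro h
    obtain ⟨s, t, rfl⟩ := List.append_of_mem h
    exact ⟨s, t, by simp⟩

theorem isIn_amp (e : String) : PySem.Str.isIn "&" e = decide ('&' ∈ e.toList) := by
  rcases h : PySem.Str.isIn "&" e with _ | _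
  · have := (PySem.Chars.isIn_eq_false_iff (s := e.toList) (sub := ['&'])).1 (by simpa using h)
    rw [singleton_infix_iff_mem] at this
    simp [this]
  · have := (PySem.Chars.isIn_iff_infix (s := e.toList) (sub := ['&'])).1 (by simpa using h)
    rw [singleton_infix_iff_mem] at this
    simp [this]

theorem foldA_eq (ts : List (List Char)) (acc : String) :
    (ts.map String.ofList).foldl (fun outputString element =>
      (if PySem.Str.isIn "&" element then outputString else outputString ++ element) ++ " ") acc
    = acc ++ String.ofList (outTok ts) := by
  induction ts generalizing acc with
  | nil => simp [outTok]
  | cons t ts ih =>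
    simp only [List.map_cons, List.foldl_cons, ih, outTok, List.map_cons, List.flatten_cons]
    rw [isIn_amp]
    have hofl : (String.ofList t).toList = t := by simp
    rw [hofl]
    by_cases h : '&' ∈ t
    · simp only [h, decide_true, if_true]
      apply String.ext
      simp
    · simp only [h, decide_false, Bool.false_eq_true, if_false]
      apply String.ext
      simp

theorem scanB_eq (cs tok : List Char) (bad : Bool) :
    scanB (cs ++ [' ']) tok bad =
      (match spTok cs with
        | [] => []
        | t :: ts => (if bad || decide ('&' ∈ t) then [] else tok ++ t) ++ ' ' :: outTok ts) := by
  induction cs generalizing tok bad with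
  | nil => simp [scanB, spTok, outTok]
  | cons c cs ih =>
    by_cases hc : c = ' '
    · subst hc
      simp only [List.cons_append, scanB, if_true, ih, spTok]
      have hne := spTok_ne_nil cs
      cases hs : spTok cs with
      | nil => exact absurd hs hne
      | cons t ts =>
        cases bad <;> by_cases h : '&' ∈ t <;> simp [outTok, h]
    · simp only [List.cons_append, scanB, if_neg hc, ih]
      have hne := spTok_ne_nil cs
      cases hs : spTok cs with
      | nil => exact absurd hs hne
      | cons t ts =>
        simp only [spTok, if_neg hc, hs]
        have hmem : ('&' ∈ c :: t) ↔ (c = '&' ∨ '&' ∈ t) := by simp [eq_comm]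
        by_cases h1 : c = '&' <;> by_cases h2 : '&' ∈ t <;> cases bad <;>
          simp [h1, h2, hmem, List.append_assoc]

-- ===== VERDICT (by name: the statement is the Claim_ definition above) =====
theorem remove_a_spec : Claim_equal_remove_a := by
  intro s _
  unfold Spec_remove_a remove_a remove_a_alt
  have hsplit : (PySem.Str.split? s " ").getD []
      = (spTok s.toList).map String.ofList := by
    simp [PySem.Str.split?, PySem.Chars.split?, show (" ").toList = [' '] from rfl,
      splitOn_space]
  rw [hsplit, foldA_eq, scanB_eq]
  have hne := spTok_ne_nil s.toList
  cases hs : spTok s.toList with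
  | nil => exact absurd hs hne
  | cons t ts =>
    simp only [outTok, List.map_cons, List.flatten_cons, List.nil_append]
    by_cases h : '&' ∈ t
    · simp [h]
    · simp [h]
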